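-- pv_equiv track=rewrite | github.com/aishamidori/adventofcode | 2020/day24/day24.py | parse_dirs
-- ===== SOURCE A (Python) =====
-- from collections import defaultdict
--
-- def parse_dirs(line):
--     dirs = defaultdict(lambda: 0)
--     i = 0
--     while i < len(line):
--         if line[i] in ('e', 'w'):
--             dirs[line[i]] += 1
--             i += 1
--         else:
--             dirs[line[i:i+2]] += 1
--             i += 2
--     return dirs
-- ===== SOURCE B (Python) =====
-- import re
-- from collections import defaultdict
--
-- def parse_dirs(line):
--     dirs = defaultdict(lambda: 0)
--     for tok in re.findall(r'[ew]|..?', line, re.DOTALL):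
--         dirs[tok] += 1
--     return dirs
-- ===== Notes on version B (the rewrite author's own statement) =====
-- stated objective: idiomatic
-- what changed: B tokenizes the whole line in one pass with re.findall(r'[ew]|..?') and then counts tokens in a second loop, replacing A's interleaved index-stepping while loop.
import Mathlib
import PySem

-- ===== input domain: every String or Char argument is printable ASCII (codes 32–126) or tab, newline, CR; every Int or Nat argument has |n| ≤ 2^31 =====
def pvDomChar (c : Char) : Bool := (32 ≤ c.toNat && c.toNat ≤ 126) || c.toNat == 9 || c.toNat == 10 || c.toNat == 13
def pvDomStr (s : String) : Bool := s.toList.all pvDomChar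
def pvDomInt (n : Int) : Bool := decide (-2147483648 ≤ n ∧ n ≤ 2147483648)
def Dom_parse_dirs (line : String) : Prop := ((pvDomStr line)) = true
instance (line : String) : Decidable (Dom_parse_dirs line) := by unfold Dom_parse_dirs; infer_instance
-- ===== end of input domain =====

-- B tokenizes first (regex '[ew]|..?') and then counts in a second pass, instead of A's
-- interleaved index loop; objective: idiomatic two-phase decomposition, same cost.

-- ===== PORT A =====
-- A's while loop over indices, transliterated as consumption of the character list:
-- one char if it is 'e'/'w', otherwise line[i:i+2] (two chars, or one at end of string).
def pvLoopA : List Char → PySem.Dict String Int → PySem.Dict String Int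
  | [], d => d
  | c :: rest, d =>
    if c = 'e' ∨ c = 'w' then
      pvLoopA rest (d.modify (String.ofList [c]) 0 (· + 1))
    else
      match rest with
      | [] => pvLoopA [] (d.modify (String.ofList [c]) 0 (· + 1))
      | c2 :: rest' => pvLoopA rest' (d.modify (String.ofList [c, c2]) 0 (· + 1))

def parse_dirs (line : String) : List (String × Int) :=
  (pvLoopA line.toList PySem.Dict.empty).items

-- ===== PORT B =====
-- re.findall(r'[ew]|..?', line, re.DOTALL): alternation prefers a single 'e'/'w',
-- otherwise '..?' takes two characters (one at end of string).
def pvTokens : List Char → List String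
  | [] => []
  | c :: rest =>
    if c = 'e' ∨ c = 'w' then String.ofList [c] :: pvTokens rest
    else
      match rest with
      | [] => [String.ofList [c]]
      | c2 :: rest' => String.ofList [c, c2] :: pvTokens rest'

def parse_dirs_alt (line : String) : List (String × Int) :=
  ((pvTokens line.toList).foldl (fun d t => d.modify t 0 (· + 1)) PySem.Dict.empty).items

-- ===== PRECONDITION & SPEC =====
def Spec_parse_dirs (line : String) (out : List (String × Int)) : Prop := out = parse_dirs_alt line
instance (line : String) (out : List (String × Int)) : Decidable (Spec_parse_dirs line out) := by unfold Spec_parse_dirs; infer_instance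

-- ===== CLAIM (what is proved, stated in full; the proofs are below) =====
def Claim_equal_parse_dirs : Prop := ∀ (line : String), Dom_parse_dirs line → Spec_parse_dirs line (parse_dirs line)

-- ===== LEMMAS AND PROOFS =====
theorem pvLoopA_eq_foldl_tokens (cs : List Char) (d : PySem.Dict String Int) :
    pvLoopA cs d = (pvTokens cs).foldl (fun d t => d.modify t 0 (· + 1)) d := by
  induction cs using pvTokens.induct generalizing d with
  | case1 => rfl
  | case2 c rest h ih =>
      unfold pvLoopA pvTokens
      rw [if_pos h, if_pos h, List.foldl_cons, ih]
  | case3 c h =>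
      unfold pvLoopA pvTokens
      rw [if_neg h, if_neg h]
      rfl
  | case4 c h c2 rest ih =>
      unfold pvLoopA pvTokens
      rw [if_neg h, if_neg h, List.foldl_cons]
      exact ih _

-- ===== VERDICT (by name: the statement is the Claim_ definition above) =====
theorem parse_dirs_spec : Claim_equal_parse_dirs := by
  intro line _
  unfold Spec_parse_dirs parse_dirs parse_dirs_alt
  rw [pvLoopA_eq_foldl_tokens]
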